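-- pv_equiv track=rewrite | github.com/CountESS-Project/Enrich2-CountESS | countess/base/dataframe.py | fill_position_gaps
-- ===== SOURCE A (Python) =====
-- def fill_position_gaps(positions, gap_size):
--     """
--     Create a list of integer positions with gaps filled in. Used by
--     :py:func:`singleton_dataframe`.
--
--     Parameters
--     ----------
--     positions : `list`
--         integer positions
--     gap_size : int
--         maximum length of gap that will be filled
--
--     Returns
--     -------
--     list
--         sorted list of unique integer positions with gaps filled
--     """
--     if len(positions) == 0:
--         raise ValueError("Empty positions list.")
--     if gap_size <= 0:
--         raise ValueError("Gap size must be a positive integer.")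
--     if not all(isinstance(p, int) for p in positions):
--         raise TypeError("Position elements must be integers.")
--     if not isinstance(gap_size, int):
--         raise TypeError("Gap size must be an integer.")
--
--     # uniqify and sort
--     positions = sorted(list(set(positions)))
--
--     # fill in short gaps
--     fill = set()
--     for i in range(len(positions) - 1):
--         delta = positions[i + 1] - positions[i]
--         if delta > 1 and delta <= gap_size:
--             fill.update(positions[i] + n + 1 for n in range(delta))
--     fill.update(positions)
--
--     return sorted(list(fill))
-- ===== SOURCE B (Python) =====
-- def fill_position_gaps(positions, gap_size):
--     """Complement strategy via interval merging: merge the sorted unique positions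
--     into maximal runs separated by gaps wider than gap_size; inside a run every gap
--     is small, so each run's whole span lo..hi gets emitted as one contiguous range."""
--     if len(positions) == 0:
--         raise ValueError("Empty positions list.")
--     if gap_size <= 0:
--         raise ValueError("Gap size must be a positive integer.")
--     if not all(isinstance(p, int) for p in positions):
--         raise TypeError("Position elements must be integers.")
--     if not isinstance(gap_size, int):
--         raise TypeError("Gap size must be an integer.")
--
--     s = sorted(set(positions))
--     runs = []
--     lo = hi = s[0]
--     for b in s[1:]:
--         if b - hi > gap_size:
--             runs.append((lo, hi))
--             lo = b
--         hi = b
--     runs.append((lo, hi))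
--
--     out = []
--     for lo, hi in runs:
--         out.extend(range(lo, hi + 1))
--     return out
-- ===== Notes on version B (the rewrite author's own statement) =====
-- stated objective: faster
-- what changed: B replaces A's gap-centric set accumulation (collect each small gap's interior into a hash set, union with the positions, re-sort) by interval merging: it merges the sorted unique positions into maximal (lo, hi) runs separated by gaps wider than gap_size and then emits each run's full contiguous span, so per-gap interiors and individual positions are never hashed into a set and no final sort is needed.
import Mathlib
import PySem

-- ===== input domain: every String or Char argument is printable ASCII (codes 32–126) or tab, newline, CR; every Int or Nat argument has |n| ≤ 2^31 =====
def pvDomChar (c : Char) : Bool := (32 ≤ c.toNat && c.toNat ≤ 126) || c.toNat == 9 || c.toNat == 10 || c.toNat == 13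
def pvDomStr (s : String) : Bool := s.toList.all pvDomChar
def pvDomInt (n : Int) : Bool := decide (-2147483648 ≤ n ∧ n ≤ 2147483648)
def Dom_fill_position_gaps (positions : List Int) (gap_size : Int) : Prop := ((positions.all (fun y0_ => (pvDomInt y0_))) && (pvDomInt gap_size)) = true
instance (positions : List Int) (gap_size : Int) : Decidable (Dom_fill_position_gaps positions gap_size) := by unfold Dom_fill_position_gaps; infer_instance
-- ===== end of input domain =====

-- B merges the sorted unique positions into maximal runs separated by oversized gaps and
-- emits each run's full contiguous span, instead of A's per-gap fill sets + union + sort;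
-- return values proved equal on Pre_.

-- ===== PORT A =====
-- A's two ValueError guards (empty list, gap_size <= 0) are excluded by Pre_; the two
-- isinstance guards never fire on List Int / Int. pyGetD's default 0 is never used:
-- i ranges over [0, len-1) so i and i+1 are in range.
def fill_position_gaps (positions : List Int) (gap_size : Int) : List Int :=
  let ps := PySem.List.sorted (PySem.Set.ofList positions) (fun x => x) false
  let fill : PySem.Set Int :=
    (PySem.List.pyRange 0 (PySem.List.len ps - 1) 1).foldl
      (fun fill i =>
        if 1 < PySem.List.pyGetD ps (i + 1) 0 - PySem.List.pyGetD ps i 0 ∧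
            PySem.List.pyGetD ps (i + 1) 0 - PySem.List.pyGetD ps i 0 ≤ gap_size then
          PySem.Set.update fill
            ((PySem.List.pyRange 0 (PySem.List.pyGetD ps (i + 1) 0 - PySem.List.pyGetD ps i 0) 1).map
              (fun n => PySem.List.pyGetD ps i 0 + n + 1))
        else fill)
      PySem.Set.empty
  PySem.List.sorted (PySem.Set.update fill ps) (fun x => x) false

-- ===== PORT B =====
-- first loop: merge into runs (state = (runs, lo, hi)); second loop: out.extend(range(lo, hi + 1))
def fill_position_gaps_alt (positions : List Int) (gap_size : Int) : List Int :=
  let s := PySem.List.sorted (PySem.Set.ofList positions) (fun x => x) false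
  let st :=
    (PySem.List.slice s (some 1) none).foldl
      (fun (acc : List (Int × Int) × Int × Int) b =>
        if gap_size < b - acc.2.2 then (acc.1 ++ [(acc.2.1, acc.2.2)], b, b)
        else (acc.1, acc.2.1, b))
      (([] : List (Int × Int)), PySem.List.pyGetD s 0 0, PySem.List.pyGetD s 0 0)
  let runs := st.1 ++ [(st.2.1, st.2.2)]
  runs.foldl (fun out r => out ++ PySem.List.pyRange r.1 (r.2 + 1) 1) []

-- ===== PRECONDITION & SPEC =====
-- Pre_ excludes exactly the inputs where A raises ValueError: the empty list and gap_size <= 0.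
def Pre_fill_position_gaps (positions : List Int) (gap_size : Int) : Prop :=
  positions ≠ [] ∧ 1 ≤ gap_size
instance (positions : List Int) (gap_size : Int) : Decidable (Pre_fill_position_gaps positions gap_size) := by unfold Pre_fill_position_gaps; infer_instance
def pvWitness_fill_position_gaps : List Int × Int := ([1, 4, 10], 3)

def Spec_fill_position_gaps (positions : List Int) (gap_size : Int) (out : List Int) : Prop := out = fill_position_gaps_alt positions gap_size
instance (positions : List Int) (gap_size : Int) (out : List Int) : Decidable (Spec_fill_position_gaps positions gap_size out) := by unfold Spec_fill_position_gaps; infer_instance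

-- ===== CLAIM (what is proved, stated in full; the proofs are below) =====
def Claim_equal_fill_position_gaps : Prop := ∀ (positions : List Int) (gap_size : Int), Dom_fill_position_gaps positions gap_size → Pre_fill_position_gaps positions gap_size → Spec_fill_position_gaps positions gap_size (fill_position_gaps positions gap_size)

-- ===== LEMMAS AND PROOFS =====

-- membership and nodup through A's "update on condition" loop
theorem mem_foldl_update_if {I : Type} (l : List I) (c : I -> Prop) [DecidablePred c]
    (f : I -> List Int) (s0 : PySem.Set Int) (x : Int) :
    x ∈ l.foldl (fun s i => if c i then PySem.Set.update s (f i) else s) s0 ↔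
      x ∈ s0 ∨ ∃ i ∈ l, c i ∧ x ∈ f i := by
  induction l generalizing s0 with
  | nil => simp
  | cons a l ih =>
    simp only [List.foldl_cons]
    by_cases h : c a
    · simp [h, ih, PySem.Set.mem_update]
      tauto
    · simp [h, ih]

theorem nodup_foldl_update_if {I : Type} (l : List I) (c : I -> Prop) [DecidablePred c]
    (f : I -> List Int) (s0 : PySem.Set Int) (h : s0.Nodup) :
    (l.foldl (fun s i => if c i then PySem.Set.update s (f i) else s) s0).Nodup := by
  induction l generalizing s0 with
  | nil => exact h
  | cons a l ih =>
    simp only [List.foldl_cons]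
    by_cases hc : c a
    · simp only [hc, if_pos]
      exact ih _ (PySem.Set.nodup_update _ _ h)
    · simp only [hc, if_neg, not_false_iff]
      exact ih _ h

-- A's index loop walks exactly the adjacent pairs of ps
theorem map_pyRange_eq_zip_tail (ps : List Int) :
    (PySem.List.pyRange 0 (PySem.List.len ps - 1) 1).map
        (fun i => (PySem.List.pyGetD ps i 0, PySem.List.pyGetD ps (i + 1) 0))
      = ps.zip ps.tail := by
  apply List.ext_getElem
  · simp [PySem.List.length_pyRange_one]
  · intro k h1 h2
    have hk : k < ps.length - 1 := by
      simpa [PySem.List.length_pyRange_one] using h1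
    simp only [List.getElem_map, List.getElem_zip, List.getElem_tail]
    rw [PySem.List.getElem_pyRange_one]
    have e1 : (0 : Int) + (k : Int) = ((k : Nat) : Int) := by omega
    rw [e1]
    have e2 : ((k : Int) + 1) = (((k + 1 : Nat)) : Int) := by push_cast; ring
    rw [e2, PySem.List.pyGetD_natCast, PySem.List.pyGetD_natCast]
    have g1 : ps.getD k 0 = ps[k] := List.getD_eq_getElem ps 0 (by omega)
    have g2 : ps.getD (k + 1) 0 = ps[k + 1] := List.getD_eq_getElem ps 0 (by omega)
    rw [g1, g2]

-- the interval A inserts for a pair (a, b) with delta = b - a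
theorem mem_gap_fill (a d x : Int) :
    x ∈ (PySem.List.pyRange 0 d 1).map (fun n => a + n + 1) ↔ a + 1 ≤ x ∧ x ≤ a + d := by
  simp only [List.mem_map, PySem.List.mem_pyRange_one]
  constructor
  · rintro ⟨n, ⟨h1, h2⟩, rfl⟩; omega
  · rintro ⟨h1, h2⟩; exact ⟨x - a - 1, by omega, by omega⟩

-- chain lower bound: every member of a strictly increasing chain is ≥ its head
theorem chain_head_le {q : Int} {t : List Int} (h : (q :: t).Pairwise (· < ·)) :
    ∀ y ∈ q :: t, q ≤ y := by
  intro y hy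
  rcases List.mem_cons.mp hy with rfl | hy
  · exact le_refl _
  · exact le_of_lt ((List.pairwise_cons.mp h).1 y hy)

-- the runs B's first loop produces, as a closed recursion on the tail of the chain
def chainRuns (g : Int) : Int → Int → List Int → List (Int × Int)
  | lo, hi, [] => [(lo, hi)]
  | lo, hi, b :: t =>
    if g < b - hi then (lo, hi) :: chainRuns g b b t else chainRuns g lo b t

-- B's first fold computes chainRuns (accumulator-prefix induction)
theorem fold_eq_chainRuns (g : Int) : ∀ (t : List Int) (lo hi : Int) (rs : List (Int × Int)),
    ((t.foldl (fun (acc : List (Int × Int) × Int × Int) b =>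
        if g < b - acc.2.2 then (acc.1 ++ [(acc.2.1, acc.2.2)], b, b)
        else (acc.1, acc.2.1, b)) (rs, lo, hi)).1
      ++ [((t.foldl (fun (acc : List (Int × Int) × Int × Int) b =>
        if g < b - acc.2.2 then (acc.1 ++ [(acc.2.1, acc.2.2)], b, b)
        else (acc.1, acc.2.1, b)) (rs, lo, hi)).2.1,
          (t.foldl (fun (acc : List (Int × Int) × Int × Int) b =>
        if g < b - acc.2.2 then (acc.1 ++ [(acc.2.1, acc.2.2)], b, b)
        else (acc.1, acc.2.1, b)) (rs, lo, hi)).2.2)])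
      = rs ++ chainRuns g lo hi t := by
  intro t
  induction t with
  | nil => intro lo hi rs; simp [chainRuns]
  | cons b t ih =>
    intro lo hi rs
    simp only [List.foldl_cons]
    by_cases hc : g < b - hi
    · simp only [hc, if_pos]
      rw [ih b b (rs ++ [(lo, hi)])]
      simp [chainRuns, hc, List.append_assoc]
    · simp only [hc, if_neg, not_false_iff]
      rw [ih lo b rs]
      simp [chainRuns, hc]

-- an empty range
theorem pyRange_one_self (a : Int) : PySem.List.pyRange a a 1 = [] :=
  List.eq_nil_of_length_eq_zero (by simp)

-- what B emits overall, as a closed recursion on the chain (one "point or filled gap" per step)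
def chainFill (g : Int) : Int → List Int → List Int
  | p, [] => [p]
  | p, b :: t =>
    (if b - p ≤ g then PySem.List.pyRange p b 1 else [p]) ++ chainFill g b t

-- expanding the runs to full spans yields chainFill (the complement identity: inside a run
-- every gap is ≤ g, so the whole span is emitted)
theorem runs_flat_eq_chainFill (g : Int) : ∀ (t : List Int) (lo hi : Int), lo ≤ hi →
    (hi :: t).Pairwise (· < ·) →
    (chainRuns g lo hi t).flatMap (fun r => PySem.List.pyRange r.1 (r.2 + 1) 1)
      = PySem.List.pyRange lo hi 1 ++ chainFill g hi t := by
  intro t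
  induction t with
  | nil =>
    intro lo hi hle _
    simp only [chainRuns, chainFill, List.flatMap_cons, List.flatMap_nil, List.append_nil]
    rw [PySem.List.pyRange_one_succ_right hle]
  | cons b t ih =>
    intro lo hi hle hpw
    have hhb : hi < b := (List.pairwise_cons.mp hpw).1 b List.mem_cons_self
    have hbt : (b :: t).Pairwise (· < ·) := (List.pairwise_cons.mp hpw).2
    by_cases hc : g < b - hi
    · have hng : ¬ (b - hi ≤ g) := by omega
      simp only [chainRuns, chainFill, hc, if_pos, hng, if_neg, not_false_iff]
      rw [List.flatMap_cons, ih b b (le_refl b) hbt, pyRange_one_self, List.nil_append,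
        PySem.List.pyRange_one_succ_right hle, List.append_assoc]
    · have hg : b - hi ≤ g := by omega
      simp only [chainRuns, chainFill, hc, if_neg, not_false_iff, hg, if_pos]
      rw [ih lo b (by omega) hbt,
        PySem.List.pyRange_one_append lo hi b hle (by omega), List.append_assoc]

-- membership in chainFill, phrased over adjacent pairs (same shape as A's loop)
theorem mem_chainFill (g x : Int) : ∀ (p : Int) (t : List Int), (p :: t).Pairwise (· < ·) →
    (x ∈ chainFill g p t ↔
      x ∈ p :: t ∨ ∃ ab ∈ (p :: t).zip t,
        1 < ab.2 - ab.1 ∧ ab.2 - ab.1 ≤ g ∧ ab.1 + 1 ≤ x ∧ x ≤ ab.2) := by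
  intro p t
  induction t generalizing p with
  | nil =>
    intro _
    simp [chainFill]
  | cons b t ih =>
    intro hpw
    have hpb : p < b := (List.pairwise_cons.mp hpw).1 b List.mem_cons_self
    have hbt : (b :: t).Pairwise (· < ·) := (List.pairwise_cons.mp hpw).2
    have hih := ih b hbt
    have hzip : (p :: b :: t).zip (b :: t) = (p, b) :: (b :: t).zip t := rfl
    rw [hzip]
    simp only [chainFill, List.mem_append, hih]
    constructor
    · rintro (hseg | hrest)
      · by_cases hc : b - p ≤ g
        · rw [if_pos hc, PySem.List.mem_pyRange_one] at hseg
          by_cases hx : x = p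
          · exact Or.inl (hx ▸ List.mem_cons_self)
          · exact Or.inr ⟨(p, b), List.mem_cons_self, by dsimp only; omega⟩
        · rw [if_neg hc] at hseg
          rcases List.mem_singleton.mp hseg with rfl
          exact Or.inl List.mem_cons_self
      · rcases hrest with hm | ⟨ab, hab, hcond⟩
        · exact Or.inl (List.mem_cons_of_mem _ hm)
        · exact Or.inr ⟨ab, List.mem_cons_of_mem _ hab, hcond⟩
    · rintro (hm | ⟨ab, hab, hcond⟩)
      · rcases List.mem_cons.mp hm with hxp | hm'
        · left
          by_cases hc : b - p ≤ g
          · rw [if_pos hc, PySem.List.mem_pyRange_one]; omega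
          · rw [if_neg hc]; exact List.mem_singleton.mpr hxp
        · exact Or.inr (Or.inl hm')
      · rcases List.mem_cons.mp hab with rfl | hab'
        · dsimp only at hcond
          obtain ⟨h1, h2, h3, h4⟩ := hcond
          by_cases hxb : x = b
          · exact Or.inr (Or.inl (hxb ▸ List.mem_cons_self))
          · left
            rw [if_pos h2, PySem.List.mem_pyRange_one]; omega
        · exact Or.inr (Or.inr ⟨ab, hab', hcond⟩)

-- every element emitted for the chain b :: t is ≥ b
theorem chainFill_lower (g : Int) {b : Int} {t : List Int}
    (hbt : (b :: t).Pairwise (· < ·)) : ∀ y ∈ chainFill g b t, b ≤ y := by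
  intro y hy
  rw [mem_chainFill g y b t hbt] at hy
  rcases hy with hm | ⟨ab, hab, h1, h2, h3, h4⟩
  · exact chain_head_le hbt y hm
  · have : b ≤ ab.1 := chain_head_le hbt _ (List.of_mem_zip hab).1
    omega

-- B's output is strictly increasing
theorem pairwise_chainFill (g : Int) : ∀ (p : Int) (t : List Int),
    (p :: t).Pairwise (· < ·) → (chainFill g p t).Pairwise (· < ·) := by
  intro p t
  induction t generalizing p with
  | nil => intro _; simp [chainFill]
  | cons b t ih =>
    intro hpw
    have hpb : p < b := (List.pairwise_cons.mp hpw).1 b List.mem_cons_self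
    have hbt : (b :: t).Pairwise (· < ·) := (List.pairwise_cons.mp hpw).2
    rw [chainFill, List.pairwise_append]
    refine ⟨?_, ih b hbt, ?_⟩
    · by_cases hc : b - p ≤ g
      · rw [if_pos hc]; exact PySem.List.pairwise_lt_pyRange_one p b
      · rw [if_neg hc]; simp
    · intro u hu v hv
      have hvb : b ≤ v := chainFill_lower g hbt v hv
      by_cases hc : b - p ≤ g
      · rw [if_pos hc, PySem.List.mem_pyRange_one] at hu; omega
      · rw [if_neg hc] at hu
        rcases List.mem_singleton.mp hu with rfl; omega

-- ===== VERDICT (by name: the statement is the Claim_ definition above) =====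
set_option maxHeartbeats 1000000 in
theorem fill_position_gaps_spec : Claim_equal_fill_position_gaps := by
  intro positions gap_size _ hpre
  obtain ⟨hne, hg⟩ := hpre
  unfold Spec_fill_position_gaps fill_position_gaps fill_position_gaps_alt
  simp only [PySem.List.slice_from_one]
  have hne' : PySem.List.sorted (PySem.Set.ofList positions) (fun x : Int => x) false ≠ [] := by
    rw [Ne, PySem.List.sorted_eq_nil_iff]
    intro h
    rcases positions with _ | ⟨a, l⟩
    · exact hne rfl
    · have ha : a ∈ PySem.Set.ofList (a :: l) := (PySem.Set.mem_ofList _ _).mpr List.mem_cons_self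
      rw [h] at ha
      simp at ha
  have hpw : (PySem.List.sorted (PySem.Set.ofList positions) (fun x : Int => x) false).Pairwise (· < ·) :=
    PySem.List.sorted_ofList_pairwise_lt _
  obtain ⟨p, t, hpt⟩ := List.exists_cons_of_ne_nil hne'
  rw [hpt] at hpw ⊢
  simp only [List.tail_cons, PySem.List.pyGetD_zero_cons]
  rw [PySem.List.foldl_append_eq_flatMap, fold_eq_chainRuns gap_size t p p [],
    List.nil_append, List.nil_append,
    runs_flat_eq_chainFill gap_size t p p (le_refl p) hpw, pyRange_one_self, List.nil_append]
  apply PySem.List.sorted_eq_of_perm_of_pairwise_lt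
  · -- the emitted chain is a permutation of A's fill set
    refine (List.perm_ext_iff_of_nodup ?_ ?_).mpr ?_
    · exact (pairwise_chainFill gap_size p t hpw).imp fun h => ne_of_lt h
    · exact PySem.Set.nodup_update _ _ (nodup_foldl_update_if _ _ _ _ List.nodup_nil)
    intro y
    rw [mem_chainFill gap_size y p t hpw]
    refine Iff.trans ?_ (PySem.Set.mem_update _ _ _).symm
    refine Iff.trans ?_ (or_congr (mem_foldl_update_if _ _ _ _ _) Iff.rfl).symm
    have hzip : (PySem.List.pyRange 0 (PySem.List.len (p :: t) - 1) 1).map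
        (fun i => (PySem.List.pyGetD (p :: t) i 0, PySem.List.pyGetD (p :: t) (i + 1) 0))
        = (p :: t).zip t := by
      simpa using map_pyRange_eq_zip_tail (p :: t)
    have hex : (∃ i ∈ PySem.List.pyRange 0 (PySem.List.len (p :: t) - 1) 1,
          (1 < PySem.List.pyGetD (p :: t) (i + 1) 0 - PySem.List.pyGetD (p :: t) i 0 ∧
            PySem.List.pyGetD (p :: t) (i + 1) 0 - PySem.List.pyGetD (p :: t) i 0 ≤ gap_size) ∧
          y ∈ (PySem.List.pyRange 0
                (PySem.List.pyGetD (p :: t) (i + 1) 0 - PySem.List.pyGetD (p :: t) i 0) 1).map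
              (fun n => PySem.List.pyGetD (p :: t) i 0 + n + 1))
        ↔ (∃ ab ∈ (p :: t).zip t,
            1 < ab.2 - ab.1 ∧ ab.2 - ab.1 ≤ gap_size ∧ ab.1 + 1 ≤ y ∧ y ≤ ab.2) := by
      constructor
      · rintro ⟨i, hi, ⟨h1, h2⟩, hy⟩
        rw [mem_gap_fill] at hy
        refine ⟨(PySem.List.pyGetD (p :: t) i 0, PySem.List.pyGetD (p :: t) (i + 1) 0),
          ?_, by dsimp only; omega⟩
        rw [← hzip]
        exact List.mem_map_of_mem hi
      · rintro ⟨ab, hab, h1, h2, h3, h4⟩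
        rw [← hzip] at hab
        obtain ⟨i, hi, heq⟩ := List.mem_map.mp hab
        rw [← heq] at h1 h2 h3 h4
        dsimp only at h1 h2 h3 h4
        refine ⟨i, hi, ⟨by omega, by omega⟩, ?_⟩
        rw [mem_gap_fill]
        omega
    constructor
    · rintro (hm | ⟨ab, hab, hc⟩)
      · exact Or.inr hm
      · refine Or.inl (Or.inr (hex.mpr ⟨ab, hab, hc⟩))
    · rintro ((hemp | hE) | hm)
      · simp [PySem.Set.empty] at hemp
      · rcases hex.mp hE with ⟨ab, hab, hc⟩
        exact Or.inr ⟨ab, hab, hc⟩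
      · exact Or.inl hm
  · exact pairwise_chainFill gap_size p t hpw
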